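-- pv_equiv track=rewrite | github.com/Juliana43-droid/MyProject | solution_k1.py | sum_negative_between_extremes
-- ===== SOURCE A (Python) =====
-- def sum_negative_between_extremes(arr):
--     if not arr:
--         return 0
--
--     max_index = arr.index(max(arr))
--     min_index = arr.index(min(arr))
--
--     start = min(max_index, min_index)
--     end = max(max_index, min_index)
--
--     return sum(x for x in arr[start + 1:end] if x < 0)
-- ===== SOURCE B (Python) =====
-- def sum_negative_between_extremes(arr):
--     if not arr:
--         return 0
--     n = len(arr)
--     hi = max(range(n), key=arr.__getitem__)
--     lo = min(range(n), key=arr.__getitem__)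
--     if hi == lo:
--         return 0
--     pref = [0]
--     for x in arr:
--         pref.append(pref[-1] + (x if x < 0 else 0))
--     i = min(hi, lo)
--     j = max(hi, lo)
--     return pref[j] - pref[i + 1]
-- ===== Notes on version B (the rewrite author's own statement) =====
-- stated objective: alternative
-- what changed: B locates the extremes by extremal search over the index range (max/min over range(n) keyed by arr.__getitem__) instead of arr.index(max(arr))/arr.index(min(arr)), and replaces A's slice-filter-sum by a prefix-sum array of negatives, returning the difference pref[end]-pref[start+1].
import Mathlib
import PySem

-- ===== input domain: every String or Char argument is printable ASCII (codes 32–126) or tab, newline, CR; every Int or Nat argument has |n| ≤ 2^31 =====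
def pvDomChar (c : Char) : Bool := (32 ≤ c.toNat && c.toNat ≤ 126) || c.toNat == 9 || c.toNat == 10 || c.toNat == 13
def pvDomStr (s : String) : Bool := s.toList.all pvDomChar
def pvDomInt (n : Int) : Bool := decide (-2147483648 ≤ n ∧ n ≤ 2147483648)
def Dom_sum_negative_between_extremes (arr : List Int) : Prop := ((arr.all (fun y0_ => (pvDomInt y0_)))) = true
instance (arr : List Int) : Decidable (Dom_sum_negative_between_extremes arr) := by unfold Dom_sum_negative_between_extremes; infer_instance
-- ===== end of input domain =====

-- B finds the extreme positions by extremal search over the index range and replaces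
-- A's slice-filter-sum by a prefix-sum array of negatives (difference of two prefix
-- sums); alternative algorithmic decomposition, same cost.

-- ===== PORT A =====
def sum_negative_between_extremes (arr : List Int) : Int :=
  if arr.isEmpty then 0
  else
    -- arr is nonempty here, so max?/min? are some and index? finds them; the
    -- `.getD 0` / wildcard arm only make the match total and are unreachable.
    match PySem.List.index? arr ((PySem.List.max? arr (fun x => x)).getD 0),
          PySem.List.index? arr ((PySem.List.min? arr (fun x => x)).getD 0) with
    | some maxIndex, some minIndex =>
      let start := Nat.min maxIndex minIndex
      let stop := Nat.max maxIndex minIndex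
      ((PySem.List.slice arr (some ((start : Int) + 1)) (some (stop : Int))).filter
        (fun x => decide (x < 0))).foldl (· + ·) 0
    | _, _ => 0

-- ===== PORT B =====
def sum_negative_between_extremes_alt (arr : List Int) : Int :=
  match arr with
  | [] => 0
  | _ :: _ =>
    let n : Int := (arr.length : Int)
    -- max(range(n), key=arr.__getitem__); range nonempty, so max?/min? are some
    let hi := (PySem.List.max? (PySem.List.pyRange 0 n 1)
                (fun i => PySem.List.pyGetD arr i 0)).getD 0
    let lo := (PySem.List.min? (PySem.List.pyRange 0 n 1)
                (fun i => PySem.List.pyGetD arr i 0)).getD 0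
    if hi = lo then 0
    else
      let pref := arr.foldl
        (fun (p : List Int) x => p ++ [PySem.List.pyGetD p (-1) 0 + (if x < 0 then x else 0)])
        [0]
      let i := min hi lo
      let j := max hi lo
      PySem.List.pyGetD pref j 0 - PySem.List.pyGetD pref (i + 1) 0

-- ===== PRECONDITION & SPEC =====
def Spec_sum_negative_between_extremes (arr : List Int) (out : Int) : Prop := out = sum_negative_between_extremes_alt arr
instance (arr : List Int) (out : Int) : Decidable (Spec_sum_negative_between_extremes arr out) := by unfold Spec_sum_negative_between_extremes; infer_instance

-- ===== CLAIM (what is proved, stated in full; the proofs are below) =====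
def Claim_equal_sum_negative_between_extremes : Prop := ∀ (arr : List Int), Dom_sum_negative_between_extremes arr → Spec_sum_negative_between_extremes arr (sum_negative_between_extremes arr)

-- ===== LEMMAS AND PROOFS =====

-- proof-side view of max?/min?'s fold once the accumulator is some
def pvArgMax (key : Int → Int) : List Int → Int → Int
  | [], m => m
  | x :: l, m => pvArgMax key l (if key m < key x then x else m)

def pvArgMin (key : Int → Int) : List Int → Int → Int
  | [], m => m
  | x :: l, m => pvArgMin key l (if key x < key m then x else m)

theorem max?_cons_eq_pvArgMax (key : Int → Int) (l : List Int) (m : Int) :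
    PySem.List.max? (m :: l) key = some (pvArgMax key l m) := by
  show List.foldl _ (some m) l = _
  induction l generalizing m with
  | nil => rfl
  | cons x l ih =>
    simp only [List.foldl, pvArgMax]
    by_cases h : key m < key x <;> simp [h, ih]

theorem min?_cons_eq_pvArgMin (key : Int → Int) (l : List Int) (m : Int) :
    PySem.List.min? (m :: l) key = some (pvArgMin key l m) := by
  show List.foldl _ (some m) l = _
  induction l generalizing m with
  | nil => rfl
  | cons x l ih =>
    simp only [List.foldl, pvArgMin]
    by_cases h : key x < key m <;> simp [h, ih]

-- invariant run of the index-argmax fold: result is the first argmax of xs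
theorem pvArgMax_invariant (xs : List Int) :
    ∀ (s m : Nat), s ≤ xs.length → m < s →
    (∀ j, j < s → xs.getD j 0 ≤ xs.getD m 0) →
    (∀ j, j < m → xs.getD j 0 < xs.getD m 0) →
    ∃ r : Nat, pvArgMax (fun i => PySem.List.pyGetD xs i 0)
        (PySem.List.pyRange (s : Int) (xs.length : Int) 1) (m : Int) = (r : Int) ∧
      r < xs.length ∧
      (∀ j, j < xs.length → xs.getD j 0 ≤ xs.getD r 0) ∧
      (∀ j, j < r → xs.getD j 0 < xs.getD r 0) := by
  intro s m
  induction h : xs.length - s generalizing s m with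
  | zero =>
    intro hs hm hmax hfirst
    refine ⟨m, ?_, by omega, fun j hj => hmax j (by omega), hfirst⟩
    rw [PySem.List.pyRange_one_eq_nil (by omega)]
    rfl
  | succ n ih =>
    intro hs hm hmax hfirst
    have hslt : s < xs.length := by omega
    rw [PySem.List.pyRange_one_cons (by exact_mod_cast hslt)]
    simp only [pvArgMax, PySem.List.pyGetD_natCast]
    have hcast : (s : Int) + 1 = ((s + 1 : Nat) : Int) := by push_cast; ring
    by_cases hlt : xs.getD m 0 < xs.getD s 0
    · rw [if_pos hlt, hcast]
      have hmax' : ∀ j, j < s + 1 → xs.getD j 0 ≤ xs.getD s 0 := by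
        intro j hj
        rcases Nat.lt_succ_iff_lt_or_eq.mp hj with hj' | hj'
        · exact le_of_lt (lt_of_le_of_lt (hmax j hj') hlt)
        · exact le_of_eq (by rw [hj'])
      have hfirst' : ∀ j, j < s → xs.getD j 0 < xs.getD s 0 := by
        intro j hj
        exact lt_of_le_of_lt (hmax j hj) hlt
      exact ih (s + 1) s (by omega) (by omega) (by omega) hmax' hfirst'
    · rw [if_neg hlt, hcast]
      have hmax' : ∀ j, j < s + 1 → xs.getD j 0 ≤ xs.getD m 0 := by
        intro j hj
        rcases Nat.lt_succ_iff_lt_or_eq.mp hj with hj' | hj'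
        · exact hmax j hj'
        · rw [hj']; exact le_of_not_gt hlt
      exact ih (s + 1) m (by omega) (by omega) (by omega) hmax' hfirst

theorem pvArgMin_invariant (xs : List Int) :
    ∀ (s m : Nat), s ≤ xs.length → m < s →
    (∀ j, j < s → xs.getD m 0 ≤ xs.getD j 0) →
    (∀ j, j < m → xs.getD m 0 < xs.getD j 0) →
    ∃ r : Nat, pvArgMin (fun i => PySem.List.pyGetD xs i 0)
        (PySem.List.pyRange (s : Int) (xs.length : Int) 1) (m : Int) = (r : Int) ∧
      r < xs.length ∧
      (∀ j, j < xs.length → xs.getD r 0 ≤ xs.getD j 0) ∧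
      (∀ j, j < r → xs.getD r 0 < xs.getD j 0) := by
  intro s m
  induction h : xs.length - s generalizing s m with
  | zero =>
    intro hs hm hmax hfirst
    refine ⟨m, ?_, by omega, fun j hj => hmax j (by omega), hfirst⟩
    rw [PySem.List.pyRange_one_eq_nil (by omega)]
    rfl
  | succ n ih =>
    intro hs hm hmax hfirst
    have hslt : s < xs.length := by omega
    rw [PySem.List.pyRange_one_cons (by exact_mod_cast hslt)]
    simp only [pvArgMin, PySem.List.pyGetD_natCast]
    have hcast : (s : Int) + 1 = ((s + 1 : Nat) : Int) := by push_cast; ring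
    by_cases hlt : xs.getD s 0 < xs.getD m 0
    · rw [if_pos hlt, hcast]
      have hmax' : ∀ j, j < s + 1 → xs.getD s 0 ≤ xs.getD j 0 := by
        intro j hj
        rcases Nat.lt_succ_iff_lt_or_eq.mp hj with hj' | hj'
        · exact le_of_lt (lt_of_lt_of_le hlt (hmax j hj'))
        · exact le_of_eq (by rw [hj'])
      have hfirst' : ∀ j, j < s → xs.getD s 0 < xs.getD j 0 := by
        intro j hj
        exact lt_of_lt_of_le hlt (hmax j hj)
      exact ih (s + 1) s (by omega) (by omega) (by omega) hmax' hfirst'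
    · rw [if_neg hlt, hcast]
      have hmax' : ∀ j, j < s + 1 → xs.getD m 0 ≤ xs.getD j 0 := by
        intro j hj
        rcases Nat.lt_succ_iff_lt_or_eq.mp hj with hj' | hj'
        · exact hmax j hj'
        · rw [hj']; exact le_of_not_gt hlt
      exact ih (s + 1) m (by omega) (by omega) (by omega) hmax' hfirst

-- a first-argmax position is what index?(max(xs)) returns
theorem index?_of_first (xs : List Int) (r : Nat) (hr : r < xs.length)
    (hfirst : ∀ j, j < r → xs.getD j 0 ≠ xs.getD r 0) :
    PySem.List.index? xs (xs.getD r 0) = some r := by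
  rw [PySem.List.index?_eq_some_iff]
  refine ⟨xs.take r, xs.drop (r + 1), ?_, List.length_take_of_le (le_of_lt hr), ?_⟩
  · rw [List.getD_eq_getElem xs 0 hr]
    conv_lhs => rw [← List.take_append_drop r xs, List.drop_eq_getElem_cons hr]
  · intro hmem
    rw [List.mem_take_iff_getElem] at hmem
    obtain ⟨j, hj, hjv⟩ := hmem
    have hjr : j < r := lt_of_lt_of_le hj (min_le_left _ _)
    have hjl : j < xs.length := by omega
    exact hfirst j hjr (by rw [List.getD_eq_getElem xs 0 hjl]; exact hjv)

-- proof-side view of B's prefix-sum loop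
def pvPref (c : Int) : List Int → List Int
  | [] => []
  | x :: l => (c + (if x < 0 then x else 0)) :: pvPref (c + (if x < 0 then x else 0)) l

def pvNegSum (l : List Int) : Int := (l.filter (fun x => decide (x < 0))).sum

theorem fold_pref_eq (l : List Int) :
    ∀ (q : List Int) (h : q ≠ []),
    l.foldl (fun (p : List Int) x =>
        p ++ [PySem.List.pyGetD p (-1) 0 + (if x < 0 then x else 0)]) q
      = q ++ pvPref (q.getLast h) l := by
  induction l with
  | nil => intro q h; simp [pvPref]
  | cons x l ih =>
    intro q h
    rw [List.foldl_cons]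
    have hq' : q ++ [PySem.List.pyGetD q (-1) 0 + (if x < 0 then x else 0)] ≠ [] := by simp
    rw [ih _ hq']
    simp only [List.getLast_concat]
    rw [PySem.List.pyGetD_neg_one q 0 h, pvPref]
    simp

theorem pvPref_getD (l : List Int) :
    ∀ (c : Int) (k : Nat), k < l.length →
    (pvPref c l).getD k 0 = c + pvNegSum (l.take (k + 1)) := by
  induction l with
  | nil => intro c k hk; simp at hk
  | cons x l ih =>
    intro c k hk
    cases k with
    | zero =>
      simp only [pvPref, List.getD_cons_zero, List.take_succ_cons, List.take_zero, pvNegSum]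
      by_cases hx : x < 0 <;> simp [hx]
    | succ k =>
      rw [pvPref, List.getD_cons_succ, ih _ k (by simpa using hk), List.take_succ_cons]
      unfold pvNegSum
      by_cases hx : x < 0 <;> simp [hx, add_assoc]

theorem negsum_eq_foldl (l : List Int) :
    (l.filter (fun x => decide (x < 0))).foldl (· + ·) 0 = pvNegSum l :=
  Eq.symm List.sum_eq_foldl

-- B's prefix list, read at position k, is the sum of the negatives of the first k elements
theorem pref_getD_eq (xs : List Int) (k : Nat) (hk : k ≤ xs.length) :
    (xs.foldl (fun (p : List Int) x =>
        p ++ [PySem.List.pyGetD p (-1) 0 + (if x < 0 then x else 0)]) [0]).getD k 0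
      = pvNegSum (xs.take k) := by
  rw [fold_pref_eq xs [0] (by simp)]
  cases k with
  | zero => simp [pvNegSum]
  | succ k =>
    have h0 : (([0] : List Int).getLast (by simp)) = 0 := rfl
    rw [h0, List.singleton_append, List.getD_cons_succ, pvPref_getD xs 0 k (by omega)]
    simp

theorem pvNegSum_append (u v : List Int) :
    pvNegSum (u ++ v) = pvNegSum u + pvNegSum v := by
  simp [pvNegSum, List.filter_append]

-- the two programs agree on a nonempty list
theorem main_cons (a : Int) (t : List Int) :
    sum_negative_between_extremes (a :: t) = sum_negative_between_extremes_alt (a :: t) := by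
  have hlen : 0 < (a :: t).length := by simp
  -- run B's index-argmax / index-argmin searches
  have htriv1 : ∀ j, j < 1 → (a :: t).getD j 0 ≤ (a :: t).getD 0 0 := by
    intro j hj
    have hj0 : j = 0 := by omega
    exact le_of_eq (by rw [hj0])
  have htriv2 : ∀ j, j < 1 → (a :: t).getD 0 0 ≤ (a :: t).getD j 0 := by
    intro j hj
    have hj0 : j = 0 := by omega
    exact le_of_eq (by rw [hj0])
  obtain ⟨rmax, hmaxeq, hrmaxlt, hmaxall, hmaxfirst⟩ :=
    pvArgMax_invariant (a :: t) 1 0 hlen (by omega) htriv1 (by intro j hj; omega)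
  obtain ⟨rmin, hmineq, hrminlt, hminall, hminfirst⟩ :=
    pvArgMin_invariant (a :: t) 1 0 hlen (by omega) htriv2 (by intro j hj; omega)
  simp only [Nat.cast_one, Nat.cast_zero] at hmaxeq hmineq
  -- A's extreme values and B's extreme positions name the same elements
  set mx := t.foldl max a with hmx
  set mn := t.foldl min a with hmn
  have hmax?_xs : PySem.List.max? (a :: t) (fun y => y) = some mx := PySem.List.max?_id_cons a t
  have hmin?_xs : PySem.List.min? (a :: t) (fun y => y) = some mn := PySem.List.min?_id_cons a t
  have hmx_le : ∀ y ∈ (a :: t), y ≤ mx := PySem.List.max?_isMax hmax?_xs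
  have hmn_le : ∀ y ∈ (a :: t), mn ≤ y := PySem.List.min?_isMin hmin?_xs
  have hgetmax : (a :: t).getD rmax 0 = mx := by
    apply le_antisymm
    · exact hmx_le _ (by rw [List.getD_eq_getElem _ 0 hrmaxlt]; exact List.getElem_mem hrmaxlt)
    · obtain ⟨k, hk, hkv⟩ := List.mem_iff_getElem.mp (PySem.List.max?_mem hmax?_xs)
      calc mx = (a :: t).getD k 0 := by rw [List.getD_eq_getElem _ 0 hk, hkv]
        _ ≤ (a :: t).getD rmax 0 := hmaxall k hk
  have hgetmin : (a :: t).getD rmin 0 = mn := by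
    apply le_antisymm
    · obtain ⟨k, hk, hkv⟩ := List.mem_iff_getElem.mp (PySem.List.min?_mem hmin?_xs)
      calc (a :: t).getD rmin 0 ≤ (a :: t).getD k 0 := hminall k hk
        _ = mn := by rw [List.getD_eq_getElem _ 0 hk, hkv]
    · exact hmn_le _ (by rw [List.getD_eq_getElem _ 0 hrminlt]; exact List.getElem_mem hrminlt)
  have hidxmax : PySem.List.index? (a :: t) mx = some rmax := by
    rw [← hgetmax]
    exact index?_of_first _ rmax hrmaxlt (fun j hj => ne_of_lt (hmaxfirst j hj))
  have hidxmin : PySem.List.index? (a :: t) mn = some rmin := by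
    rw [← hgetmin]
    exact index?_of_first _ rmin hrminlt (fun j hj => ne_of_gt (hminfirst j hj))
  -- reduce A to a slice sum over the Nat interval
  have hA : sum_negative_between_extremes (a :: t)
      = ((PySem.List.slice (a :: t) (some (((Nat.min rmax rmin : Nat) : Int) + 1))
            (some ((Nat.max rmax rmin : Nat) : Int))).filter
          (fun x => decide (x < 0))).foldl (· + ·) 0 := by
    simp only [sum_negative_between_extremes, List.isEmpty_cons, Bool.false_eq_true, if_false,
      hmax?_xs, hmin?_xs, Option.getD_some, hidxmax, hidxmin]
  -- reduce B to a difference of prefix reads over the same interval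
  have hrange : PySem.List.pyRange 0 (((a :: t).length : Nat) : Int) 1
      = 0 :: PySem.List.pyRange 1 (((a :: t).length : Nat) : Int) 1 := by
    rw [PySem.List.pyRange_one_cons (by exact_mod_cast hlen)]
    norm_num
  have hB : sum_negative_between_extremes_alt (a :: t)
      = if (rmax : Int) = (rmin : Int) then 0
        else
          PySem.List.pyGetD
            ((a :: t).foldl (fun (p : List Int) x =>
              p ++ [PySem.List.pyGetD p (-1) 0 + (if x < 0 then x else 0)]) [0])
            ((Nat.max rmax rmin : Nat) : Int) 0
          - PySem.List.pyGetD
            ((a :: t).foldl (fun (p : List Int) x =>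
              p ++ [PySem.List.pyGetD p (-1) 0 + (if x < 0 then x else 0)]) [0])
            (((Nat.min rmax rmin : Nat) : Int) + 1) 0 := by
    simp only [sum_negative_between_extremes_alt, hrange,
      max?_cons_eq_pvArgMax, min?_cons_eq_pvArgMin, Option.getD_some, hmaxeq, hmineq]
    have h1 : max ((rmax : Nat) : Int) ((rmin : Nat) : Int) = ((Nat.max rmax rmin : Nat) : Int) := by
      push_cast; rfl
    have h2 : min ((rmax : Nat) : Int) ((rmin : Nat) : Int) = ((Nat.min rmax rmin : Nat) : Int) := by
      push_cast; rfl
    rw [h1, h2]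
  rw [hA, hB]
  by_cases heq : (rmax : Int) = (rmin : Int)
  · -- extremes at the same position: both sides are 0
    have hrr : rmax = rmin := by exact_mod_cast heq
    rw [if_pos heq, hrr]
    have hmm : Nat.min rmin rmin = rmin := Nat.min_self rmin
    have hMM : Nat.max rmin rmin = rmin := Nat.max_self rmin
    rw [hmm, hMM]
    have hc : ((rmin : Nat) : Int) + 1 = ((rmin + 1 : Nat) : Int) := by push_cast; ring
    rw [hc, PySem.List.slice_natCast]
    have : rmin - (rmin + 1) = 0 := by omega
    rw [this]
    simp
  · rw [if_neg heq]
    set iN := Nat.min rmax rmin with hiN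
    set jN := Nat.max rmax rmin with hjN
    have hrr : rmax ≠ rmin := fun h => heq (by rw [h])
    have hij : iN + 1 ≤ jN := by
      have e1 : iN = min rmax rmin := hiN
      have e2 : jN = max rmax rmin := hjN
      omega
    have hjlt : jN < (a :: t).length := by
      rw [hjN]; exact Nat.max_lt.mpr ⟨hrmaxlt, hrminlt⟩
    -- B's two prefix reads are negative-prefix sums
    have hc1 : ((iN : Nat) : Int) + 1 = ((iN + 1 : Nat) : Int) := by push_cast; ring
    rw [hc1, PySem.List.pyGetD_natCast, PySem.List.pyGetD_natCast,
      pref_getD_eq _ jN (le_of_lt hjlt), pref_getD_eq _ (iN + 1) (by omega),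
      PySem.List.slice_natCast, negsum_eq_foldl]
    -- split the prefix of length jN at iN + 1
    have hsplit : (a :: t).take jN
        = (a :: t).take (iN + 1) ++ ((a :: t).drop (iN + 1)).take (jN - (iN + 1)) := by
      conv_lhs => rw [show jN = (iN + 1) + (jN - (iN + 1)) by omega]
      rw [List.take_add]
    rw [hsplit, pvNegSum_append]
    ring

-- ===== VERDICT (by name: the statement is the Claim_ definition above) =====
theorem sum_negative_between_extremes_spec : Claim_equal_sum_negative_between_extremes := by
  intro arr _
  unfold Spec_sum_negative_between_extremes
  cases arr with
  | nil => rfl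
  | cons a t => exact main_cons a t
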